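-- pv_equiv track=rewrite | github.com/DavideB45/DavideUnipi | python/esercizi/esame.py | find_A_in_B
-- ===== SOURCE A (Python) =====
-- def find_A_in_B(A, B):
-- 	#creo un dizionario per semplificare la ricerca
-- 	Dictionary = {}
-- 	for i in range(B.__len__()):
-- 		for j in range(B[i].__len__()):
-- 			if(Dictionary.get(B[i][j])==None):
-- 				Dictionary[B[i][j]] = 1
-- 			else:
-- 				Dictionary[B[i][j]] = Dictionary[B[i][j]] + 1
--
-- 	#cerco A in B
-- 	for i in range(A.__len__()):
-- 		for j in A[i]:
-- 			if(Dictionary.get(j)==None or Dictionary.get(j)==0):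
-- 				#non c'e' il numero o non occorre abbastanza volte
-- 				return False
-- 			else:
-- 				#rimuovo un' occorrenza
-- 				Dictionary[j] = Dictionary[j] - 1
-- 	#ho trovato tutta A
-- 	return True
-- ===== SOURCE B (Python) =====
-- def find_A_in_B(A, B):
--     sa = sorted(x for row in A for x in row)
--     sb = sorted(x for row in B for x in row)
--     i = j = 0
--     while i < len(sa):
--         if j == len(sb):
--             return False
--         if sb[j] == sa[i]:
--             i += 1
--             j += 1
--         elif sb[j] < sa[i]:
--             j += 1
--         else:
--             return False
--     return True
-- ===== Notes on version B (the rewrite author's own statement) =====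
-- stated objective: alternative
-- what changed: Replaces A's hash-counting pass plus destructive decrement-with-early-return pass by an ordering-based algorithm: sort both flattened lists and check multiset containment with a single two-pointer merge scan.
import Mathlib
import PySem

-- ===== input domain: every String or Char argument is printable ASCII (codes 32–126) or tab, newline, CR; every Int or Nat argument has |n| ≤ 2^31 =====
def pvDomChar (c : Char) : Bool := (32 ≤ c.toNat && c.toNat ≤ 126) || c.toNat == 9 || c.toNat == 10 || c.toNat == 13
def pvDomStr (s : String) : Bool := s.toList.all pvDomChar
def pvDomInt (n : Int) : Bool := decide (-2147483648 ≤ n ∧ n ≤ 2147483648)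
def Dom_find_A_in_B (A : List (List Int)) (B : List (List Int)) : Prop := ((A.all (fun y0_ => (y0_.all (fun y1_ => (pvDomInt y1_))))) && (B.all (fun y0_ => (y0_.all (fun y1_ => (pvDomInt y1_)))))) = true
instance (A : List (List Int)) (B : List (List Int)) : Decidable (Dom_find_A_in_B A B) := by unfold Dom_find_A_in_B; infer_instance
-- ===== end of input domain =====

-- B replaces A's hash-counting pass plus destructive decrement-with-early-return pass by an
-- ordering-based algorithm: sort both flattened lists, then one two-pointer merge scan;
-- objective: alternative (not claimed faster).

-- ===== PORT A =====
def find_A_in_B (A : List (List Int)) (B : List (List Int)) : Bool :=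
  -- for i in range(len(B)): for j in range(len(B[i])): count B[i][j] into Dictionary
  let d0 : PySem.Dict Int Int :=
    (PySem.List.pyRange 0 (PySem.List.len B)).foldl
      (fun d i =>
        (PySem.List.pyRange 0 (PySem.List.len (PySem.List.pyGetD B i []))).foldl
          (fun d j =>
            let x := PySem.List.pyGetD (PySem.List.pyGetD B i []) j 0
            if d.get? x == none then d.insert x 1 else d.insert x (d.getD x 0 + 1))
          d)
      PySem.Dict.empty
  -- for i in range(len(A)): for j in A[i]: early 'return False' modelled by the 'none' state
  let r : Option (PySem.Dict Int Int) :=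
    (PySem.List.pyRange 0 (PySem.List.len A)).foldl
      (fun s i =>
        (PySem.List.pyGetD A i []).foldl
          (fun s x =>
            match s with
            | none => none
            | some d =>
              if d.get? x == none || d.get? x == some 0 then none
              else some (d.insert x (d.getD x 0 - 1)))
          s)
      (some d0)
  r.isSome

-- ===== PORT B =====
-- the two-pointer while loop of Source B, as recursion on the suffixes sa[i:], sb[j:]
def pvMergeChk (sa sb : List Int) : Bool :=
  match sa, sb with
  | [], _ => true
  | _ :: _, [] => false
  | a :: as, b :: bs =>
    if b == a then pvMergeChk as bs
    else if b < a then pvMergeChk (a :: as) bs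
    else false
termination_by sb.length
decreasing_by all_goals simp

def find_A_in_B_alt (A : List (List Int)) (B : List (List Int)) : Bool :=
  let sa := PySem.List.sorted (A.flatMap (fun row => row)) (fun x => x) false
  let sb := PySem.List.sorted (B.flatMap (fun row => row)) (fun x => x) false
  pvMergeChk sa sb

-- ===== PRECONDITION & SPEC =====
def Spec_find_A_in_B (A : List (List Int)) (B : List (List Int)) (out : Bool) : Prop := out = find_A_in_B_alt A B
instance (A : List (List Int)) (B : List (List Int)) (out : Bool) : Decidable (Spec_find_A_in_B A B out) := by unfold Spec_find_A_in_B; infer_instance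

-- ===== CLAIM (what is proved, stated in full; the proofs are below) =====
def Claim_equal_find_A_in_B : Prop := ∀ (A : List (List Int)) (B : List (List Int)), Dom_find_A_in_B A B → Spec_find_A_in_B A B (find_A_in_B A B)

-- ===== LEMMAS AND PROOFS =====

-- A's phase-1 body always inserts getD+1 (in the 'None' branch getD is 0).
lemma step1_collapse :
    (fun (d : PySem.Dict Int Int) (x : Int) =>
      if d.get? x == none then d.insert x 1 else d.insert x (d.getD x 0 + 1))
    = (fun d x => d.insert x (d.getD x 0 + 1)) := by
  funext d x
  by_cases h : d.get? x = none
  · simp [h, PySem.Dict.getD_of_get?_eq_none d 0 h]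
  · simp [h]

-- the 'none' (already returned False) state absorbs the rest of the phase-2 loop
lemma foldl_step2_none (l : List Int) :
    l.foldl
      (fun (s : Option (PySem.Dict Int Int)) x =>
        match s with
        | none => none
        | some d =>
          if d.get? x == none || d.get? x == some 0 then none
          else some (d.insert x (d.getD x 0 - 1)))
      none = none := by
  induction l with
  | nil => rfl
  | cons x l ih => simpa using ih

-- the consuming loop succeeds iff every element's count fits the remaining budget
lemma go_spec (l : List Int) (d : PySem.Dict Int Int) (hpos : ∀ x, 0 ≤ d.getD x 0) :
    (l.foldl
      (fun (s : Option (PySem.Dict Int Int)) x =>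
        match s with
        | none => none
        | some d =>
          if d.get? x == none || d.get? x == some 0 then none
          else some (d.insert x (d.getD x 0 - 1)))
      (some d)).isSome = true
    ↔ (∀ x, (l.count x : Int) ≤ d.getD x 0) := by
  induction l generalizing d with
  | nil =>
    simp only [List.foldl_nil, Option.isSome_some, true_iff]
    intro x; simpa using hpos x
  | cons x l ih =>
    rcases h : d.get? x with _ | v
    · have hd0 : d.getD x 0 = 0 := PySem.Dict.getD_of_get?_eq_none d 0 h
      simp only [List.foldl_cons, h]
      rw [show (if (none : Option Int) == none || (none : Option Int) == some 0 then
            (none : Option (PySem.Dict Int Int)) else some (d.insert x (d.getD x 0 - 1))) = none by simp]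
      rw [foldl_step2_none]
      simp only [Option.isSome_none, Bool.false_eq_true, false_iff, not_forall]
      refine ⟨x, ?_⟩
      rw [hd0, List.count_cons_self]
      push_cast; omega
    · have hdv : d.getD x 0 = v := PySem.Dict.getD_of_get?_eq_some d 0 h
      by_cases hv : v = 0
      · subst hv
        simp only [List.foldl_cons, h]
        rw [show (if (some (0:Int)) == none || (some (0:Int)) == some 0 then
              (none : Option (PySem.Dict Int Int)) else some (d.insert x (d.getD x 0 - 1))) = none by simp]
        rw [foldl_step2_none]
        simp only [Option.isSome_none, Bool.false_eq_true, false_iff, not_forall]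
        refine ⟨x, ?_⟩
        rw [hdv, List.count_cons_self]
        push_cast; omega
      · simp only [List.foldl_cons, h]
        rw [show (if (some v) == none || (some v) == some 0 then
              (none : Option (PySem.Dict Int Int)) else some (d.insert x (d.getD x 0 - 1))) =
              some (d.insert x (d.getD x 0 - 1)) by simp [hv]]
        have hvpos : 0 < v := lt_of_le_of_ne (hdv ▸ hpos x) (Ne.symm hv)
        rw [ih _ (by
          intro y
          rw [PySem.Dict.getD_insert]
          split
          · omega
          · exact hpos y)]
        constructor
        · intro hall y
          have hy := hall y
          rw [PySem.Dict.getD_insert] at hy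
          by_cases hyx : y = x
          · subst hyx
            rw [if_pos rfl] at hy
            rw [List.count_cons_self]
            push_cast
            omega
          · rw [if_neg hyx] at hy
            rw [List.count_cons_of_ne (Ne.symm hyx)]
            exact hy
        · intro hall y
          have hy := hall y
          rw [PySem.Dict.getD_insert]
          by_cases hyx : y = x
          · subst hyx
            rw [if_pos rfl]
            rw [List.count_cons_self] at hy
            push_cast at hy
            omega
          · rw [if_neg hyx]
            rw [List.count_cons_of_ne (Ne.symm hyx)] at hy
            exact hy

-- B's merge scan on sorted lists decides multiset containment
lemma mergeChk_iff (sa sb : List Int) (ha : sa.Pairwise (· ≤ ·)) (hb : sb.Pairwise (· ≤ ·)) :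
    pvMergeChk sa sb = true ↔ ∀ x : Int, sa.count x ≤ sb.count x := by
  induction sb generalizing sa with
  | nil =>
    cases sa with
    | nil => simp [pvMergeChk]
    | cons a as =>
      rw [show pvMergeChk (a :: as) [] = false by simp [pvMergeChk]]
      simp only [Bool.false_eq_true, false_iff, not_forall]
      refine ⟨a, ?_⟩
      rw [List.count_cons_self, List.count_nil]
      omega
  | cons b bs ih =>
    cases sa with
    | nil => simp [pvMergeChk]
    | cons a as =>
      obtain ⟨ha1, ha2⟩ := List.pairwise_cons.mp ha
      obtain ⟨hb1, hb2⟩ := List.pairwise_cons.mp hb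
      by_cases hba : b = a
      · subst hba
        rw [show pvMergeChk (b :: as) (b :: bs) = pvMergeChk as bs by simp [pvMergeChk]]
        rw [ih as ha2 hb2]
        constructor
        · intro h x
          have hx := h x
          by_cases hxb : x = b
          · subst hxb
            rw [List.count_cons_self, List.count_cons_self]
            omega
          · rwa [List.count_cons_of_ne (fun he => hxb he.symm),
                List.count_cons_of_ne (fun he => hxb he.symm)]
        · intro h x
          have hx := h x
          by_cases hxb : x = b
          · subst hxb
            rw [List.count_cons_self, List.count_cons_self] at hx
            omega
          · rwa [List.count_cons_of_ne (fun he => hxb he.symm),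
                List.count_cons_of_ne (fun he => hxb he.symm)] at hx
      · by_cases hlt : b < a
        · rw [show pvMergeChk (a :: as) (b :: bs) = pvMergeChk (a :: as) bs by
            simp [pvMergeChk, hba, hlt]]
          rw [ih _ ha hb2]
          have hnb : b ∉ a :: as := by
            intro hmem
            rcases List.mem_cons.mp hmem with he | hmem
            · exact hba he
            · exact absurd (ha1 b hmem) (not_le.mpr hlt)
          constructor
          · intro h x
            have hx := h x
            by_cases hxb : x = b
            · subst hxb
              rw [List.count_cons_self]
              omega
            · rw [List.count_cons_of_ne (fun he => hxb he.symm)]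
              exact hx
          · intro h x
            have hx := h x
            by_cases hxb : x = b
            · subst hxb
              rw [List.count_eq_zero_of_not_mem hnb]
              exact Nat.zero_le _
            · rwa [List.count_cons_of_ne (fun he => hxb he.symm)] at hx
        · have hab : a < b := lt_of_le_of_ne (not_lt.mp hlt) (fun he => hba he.symm)
          rw [show pvMergeChk (a :: as) (b :: bs) = false by simp [pvMergeChk, hba, hlt]]
          simp only [Bool.false_eq_true, false_iff, not_forall]
          refine ⟨a, ?_⟩
          have hna : a ∉ b :: bs := by
            intro hmem
            rcases List.mem_cons.mp hmem with he | hmem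
            · exact absurd he (ne_of_lt hab)
            · exact absurd (hb1 a hmem) (not_le.mpr hab)
          rw [List.count_eq_zero_of_not_mem hna, List.count_cons_self]
          omega

-- ===== VERDICT (by name: the statement is the Claim_ definition above) =====
theorem find_A_in_B_spec : Claim_equal_find_A_in_B := by
  intro A B _
  unfold Spec_find_A_in_B find_A_in_B find_A_in_B_alt
  dsimp only
  have eB := PySem.List.foldl_pyRange_zero_pyGetD B ([] : List Int)
      (fun (d : PySem.Dict Int Int) row => (PySem.List.pyRange 0 (PySem.List.len row)).foldl
          (fun d j =>
            if d.get? (PySem.List.pyGetD row j 0) == none then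
              d.insert (PySem.List.pyGetD row j 0) 1
            else d.insert (PySem.List.pyGetD row j 0) (d.getD (PySem.List.pyGetD row j 0) 0 + 1)) d)
      PySem.Dict.empty
  beta_reduce at eB
  rw [eB]
  have eA := PySem.List.foldl_pyRange_zero_pyGetD A ([] : List Int)
      (fun (s : Option (PySem.Dict Int Int)) row => row.foldl
          (fun (s : Option (PySem.Dict Int Int)) x =>
            match s with
            | none => none
            | some d =>
              if d.get? x == none || d.get? x == some 0 then none
              else some (d.insert x (d.getD x 0 - 1))) s)
      (some (B.foldl (fun d row => (PySem.List.pyRange 0 (PySem.List.len row)).foldl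
          (fun d j =>
            if d.get? (PySem.List.pyGetD row j 0) == none then
              d.insert (PySem.List.pyGetD row j 0) 1
            else d.insert (PySem.List.pyGetD row j 0) (d.getD (PySem.List.pyGetD row j 0) 0 + 1)) d)
        PySem.Dict.empty))
  beta_reduce at eA
  rw [eA]
  have hB : ∀ (rows : List (List Int)) (d : PySem.Dict Int Int),
      rows.foldl (fun d row => (PySem.List.pyRange 0 (PySem.List.len row)).foldl
          (fun d j =>
            if d.get? (PySem.List.pyGetD row j 0) == none then
              d.insert (PySem.List.pyGetD row j 0) 1
            else d.insert (PySem.List.pyGetD row j 0) (d.getD (PySem.List.pyGetD row j 0) 0 + 1)) d) d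
      = (rows.flatten).foldl (fun d x => d.insert x (d.getD x 0 + 1)) d := by
    intro rows d
    induction rows generalizing d with
    | nil => rfl
    | cons row rows ihr =>
      rw [List.foldl_cons, ihr, List.flatten_cons, List.foldl_append]
      congr 1
      have er := PySem.List.foldl_pyRange_zero_pyGetD row (0 : Int)
          (fun (d : PySem.Dict Int Int) x =>
            if d.get? x == none then d.insert x 1 else d.insert x (d.getD x 0 + 1)) d
      beta_reduce at er
      rw [er, step1_collapse]
  rw [hB]
  have hA : ∀ (rows : List (List Int)) (s : Option (PySem.Dict Int Int)),
      rows.foldl (fun s row => row.foldl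
          (fun (s : Option (PySem.Dict Int Int)) x =>
            match s with
            | none => none
            | some d =>
              if d.get? x == none || d.get? x == some 0 then none
              else some (d.insert x (d.getD x 0 - 1))) s) s
      = (rows.flatten).foldl
          (fun (s : Option (PySem.Dict Int Int)) x =>
            match s with
            | none => none
            | some d =>
              if d.get? x == none || d.get? x == some 0 then none
              else some (d.insert x (d.getD x 0 - 1))) s := by
    intro rows s
    induction rows generalizing s with
    | nil => rfl
    | cons row rows ihr => rw [List.foldl_cons, ihr, List.flatten_cons, List.foldl_append]
  rw [hA]
  have hget : ∀ x : Int,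
      ((List.foldl (fun (d : PySem.Dict Int Int) x => d.insert x (d.getD x 0 + 1))
          PySem.Dict.empty B.flatten).getD x 0)
        = (List.count x B.flatten : Int) := by
    intro x
    rw [PySem.Dict.getD_foldl_insert_add_one]
    simp
  rw [Bool.eq_iff_iff]
  rw [go_spec A.flatten _ (fun x => by rw [hget x]; positivity)]
  have hsa := PySem.List.sorted_perm (A.flatMap (fun row => row)) (fun x : Int => x) false
  have hsb := PySem.List.sorted_perm (B.flatMap (fun row => row)) (fun x : Int => x) false
  rw [mergeChk_iff _ _
      (by simpa using PySem.List.sorted_pairwise (A.flatMap (fun row => row)) (fun x : Int => x))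
      (by simpa using PySem.List.sorted_pairwise (B.flatMap (fun row => row)) (fun x : Int => x))]
  constructor
  · intro h x
    rw [hsa.count_eq, hsb.count_eq]
    have := h x
    rw [hget x] at this
    simpa using (by exact_mod_cast this : List.count x A.flatten ≤ List.count x B.flatten)
  · intro h x
    rw [hget x]
    have := h x
    rw [hsa.count_eq, hsb.count_eq] at this
    simp only [List.flatMap_id'] at this
    exact_mod_cast this
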